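-- pv_equiv track=rewrite | github.com/bonasoobin/Practice | 프로그래머스/unrated/181856. 배열 비교하기/배열 비교하기.py | solution
-- ===== SOURCE A (Python) =====
-- def solution(arr1, arr2):
--     answer1 = 0
--     answer2 = 0
--     if len(arr1) < len(arr2):
--         return -1
--     elif len(arr1) > len(arr2):
--         return 1
--     elif len(arr1) == len(arr2):
--         for i in range(len(arr1)):
--             answer1 += arr1[i]
--         for j in range(len(arr2)):
--             answer2 += arr2[j]
--
--         if answer1 < answer2:
--             return -1
--         elif answer1 > answer2:
--             return 1
--         else:
--             return 0
-- ===== SOURCE B (Python) =====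
-- def solution(arr1, arr2):
--     # One simultaneous pass: walk both arrays together keeping a running
--     # difference; whichever runs out first is the smaller, ties by the sign
--     # of the accumulated difference.
--     diff = 0
--     i = 0
--     while i < len(arr1) and i < len(arr2):
--         diff += arr1[i] - arr2[i]
--         i += 1
--     if i < len(arr2):
--         return -1
--     if i < len(arr1):
--         return 1
--     return (diff > 0) - (diff < 0)
-- ===== Notes on version B (the rewrite author's own statement) =====
-- stated objective: alternative
-- what changed: Replaces A's staged cascade (length comparison, then two separate sum loops, then sum comparison) with one simultaneous walk over both arrays keeping a running element-wise difference: the verdict comes from which array is exhausted first, and only on simultaneous exhaustion from the sign of the accumulated difference; lengths and the two sums are never computed separately.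
import Mathlib
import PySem

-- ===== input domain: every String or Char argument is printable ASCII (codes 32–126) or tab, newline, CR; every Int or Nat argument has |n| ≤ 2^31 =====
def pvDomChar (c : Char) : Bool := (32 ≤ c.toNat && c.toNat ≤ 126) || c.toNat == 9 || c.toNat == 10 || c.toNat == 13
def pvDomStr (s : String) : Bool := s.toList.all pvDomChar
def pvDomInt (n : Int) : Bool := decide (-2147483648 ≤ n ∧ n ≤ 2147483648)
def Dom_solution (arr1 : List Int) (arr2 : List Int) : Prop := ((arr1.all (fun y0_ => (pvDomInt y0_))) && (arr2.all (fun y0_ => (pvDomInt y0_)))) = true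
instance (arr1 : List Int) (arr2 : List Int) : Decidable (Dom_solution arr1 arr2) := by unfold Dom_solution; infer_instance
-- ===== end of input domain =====

-- ===== PORT A =====
-- B replaces A's staged cascade with one simultaneous walk over both arrays keeping a running difference; same asymptotic cost.
def solution (arr1 : List Int) (arr2 : List Int) : Int :=
  if (arr1.length : Int) < (arr2.length : Int) then -1
  else if (arr1.length : Int) > (arr2.length : Int) then 1
  else
    let answer1 := (PySem.List.pyRange 0 (arr1.length : Int) 1).foldl
      (fun acc i => acc + PySem.List.pyGetD arr1 i 0) 0
    let answer2 := (PySem.List.pyRange 0 (arr2.length : Int) 1).foldl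
      (fun acc j => acc + PySem.List.pyGetD arr2 j 0) 0
    if answer1 < answer2 then -1
    else if answer1 > answer2 then 1
    else 0

-- ===== PORT B =====
-- the while loop of Source B: recursion over both lists together with the running difference
def walkBoth : List Int → List Int → Int → Int
  | x :: xs, y :: ys, diff => walkBoth xs ys (diff + x - y)
  | [], _ :: _, _ => -1
  | _ :: _, [], _ => 1
  | [], [], diff => (if diff > 0 then (1 : Int) else 0) - (if diff < 0 then (1 : Int) else 0)

def solution_alt (arr1 : List Int) (arr2 : List Int) : Int := walkBoth arr1 arr2 0

-- ===== PRECONDITION & SPEC =====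
def Spec_solution (arr1 : List Int) (arr2 : List Int) (out : Int) : Prop := out = solution_alt arr1 arr2
instance (arr1 : List Int) (arr2 : List Int) (out : Int) : Decidable (Spec_solution arr1 arr2 out) := by unfold Spec_solution; infer_instance

-- ===== CLAIM (what is proved, stated in full; the proofs are below) =====
def Claim_equal_solution : Prop := ∀ (arr1 : List Int) (arr2 : List Int), Dom_solution arr1 arr2 → Spec_solution arr1 arr2 (solution arr1 arr2)

-- ===== LEMMAS AND PROOFS =====

-- ===== VERDICT (by name: the statement is the Claim_ definition above) =====
theorem sum_loop (xs : List Int) :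
    (PySem.List.pyRange 0 (xs.length : Int) 1).foldl
      (fun acc i => acc + PySem.List.pyGetD xs i 0) 0 = xs.sum := by
  rw [PySem.List.foldl_pyRange_zero_pyGetD' xs (0 : Int) (· + ·) 0]
  simp [List.sum_eq_foldl]

theorem walkBoth_eq (xs : List Int) : ∀ (ys : List Int) (d : Int),
    walkBoth xs ys d =
      if (xs.length : Int) < ys.length then -1
      else if (ys.length : Int) < xs.length then 1
      else (if d + xs.sum - ys.sum > 0 then (1 : Int) else 0) -
           (if d + xs.sum - ys.sum < 0 then (1 : Int) else 0) := by
  induction xs with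
  | nil =>
    intro ys d
    cases ys with
    | nil => simp [walkBoth]
    | cons y ys => simp [walkBoth]
  | cons x xs ih =>
    intro ys d
    cases ys with
    | nil => simp [walkBoth]; omega
    | cons y ys =>
      rw [walkBoth, ih]
      have h : d + x - y + xs.sum - ys.sum = d + (x :: xs).sum - (y :: ys).sum := by
        simp; ring
      simp only [List.length_cons, h]
      congr 1 <;> [skip; congr 1] <;> simp

theorem solution_spec : Claim_equal_solution := by
  intro arr1 arr2 _
  unfold Spec_solution solution solution_alt
  rw [sum_loop, sum_loop, walkBoth_eq]
  dsimp only
  split_ifs <;> omega
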